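-- pv_equiv track=rewrite | github.com/HUNNNGRY/cfPeak | scripts/cfpeak.py | get_chunkify_readsList
-- ===== SOURCE A (Python) =====
-- def get_chunkify_readsList(child_gene_list, all_tx_reads):
--     chunkify_gene_reads = []
--     n = len(child_gene_list)
--     for i in range(n):
--         chunkify_gene_reads.append([])
--     for read in all_tx_reads:
--         ref_id,qname,pos,rlen,score = read
--         for i in range(n):
--             if ref_id in child_gene_list[i]:
--                 chunkify_gene_reads[i].append(read) # not add [read]
--                 break # skip this if
--     return chunkify_gene_reads
-- ===== SOURCE B (Python) =====
-- def get_chunkify_readsList(child_gene_list, all_tx_reads):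
--     chunkify_gene_reads = []
--     prev_union = set()
--     for chunk in child_gene_list:
--         chunkify_gene_reads.append([read for read in all_tx_reads
--                                     if read[0] in chunk and read[0] not in prev_union])
--         prev_union.update(chunk)
--     return chunkify_gene_reads
-- ===== Notes on version B (the rewrite author's own statement) =====
-- stated objective: alternative
-- what changed: Inverted the nesting: instead of A's read-outer loop with an inner scan over chunks and a break, B loops over chunks, building each bucket in one pass over the reads while a running set of genes seen in earlier chunks encodes first-match-wins.
import Mathlib
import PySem

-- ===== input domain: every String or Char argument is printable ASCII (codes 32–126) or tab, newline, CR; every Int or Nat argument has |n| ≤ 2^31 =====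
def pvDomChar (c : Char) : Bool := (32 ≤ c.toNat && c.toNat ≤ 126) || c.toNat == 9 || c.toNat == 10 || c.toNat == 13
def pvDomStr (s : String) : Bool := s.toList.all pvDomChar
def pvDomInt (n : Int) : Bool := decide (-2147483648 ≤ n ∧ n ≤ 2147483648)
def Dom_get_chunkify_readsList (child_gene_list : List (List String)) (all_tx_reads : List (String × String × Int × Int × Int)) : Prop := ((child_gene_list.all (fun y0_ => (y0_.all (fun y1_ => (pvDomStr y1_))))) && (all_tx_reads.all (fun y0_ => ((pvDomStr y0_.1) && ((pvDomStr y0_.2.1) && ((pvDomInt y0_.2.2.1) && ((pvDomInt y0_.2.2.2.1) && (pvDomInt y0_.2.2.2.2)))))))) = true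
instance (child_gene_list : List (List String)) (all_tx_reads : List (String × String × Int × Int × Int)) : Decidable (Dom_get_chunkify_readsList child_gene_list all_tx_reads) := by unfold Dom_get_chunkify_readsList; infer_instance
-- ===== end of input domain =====

-- B inverts A's nesting: chunk-outer with a running set of genes seen in earlier chunks,
-- building each bucket in one pass over the reads (objective: alternative decomposition).

-- ===== PORT A =====
-- inner loop 'for i in range(n): if ref_id in child_gene_list[i]: append; break',
-- walking chunks and buckets in parallel (index i).
def pvPlace (chunks : List (List String))
    (buckets : List (List (String × String × Int × Int × Int)))
    (read : String × String × Int × Int × Int) :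
    List (List (String × String × Int × Int × Int)) :=
  match chunks, buckets with
  | c :: cs, b :: bs =>
      if c.contains read.1 then (b ++ [read]) :: bs
      else b :: pvPlace cs bs read
  | _, bs => bs

def get_chunkify_readsList (child_gene_list : List (List String)) (all_tx_reads : List (String × String × Int × Int × Int)) : List (List (String × String × Int × Int × Int)) :=
  all_tx_reads.foldl (fun buckets read => pvPlace child_gene_list buckets read)
    (child_gene_list.map fun _ => [])

-- ===== PORT B =====
-- chunk-outer loop; state = (buckets so far, set of genes in earlier chunks)
def get_chunkify_readsList_alt (child_gene_list : List (List String)) (all_tx_reads : List (String × String × Int × Int × Int)) : List (List (String × String × Int × Int × Int)) :=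
  (child_gene_list.foldl
    (fun (acc : List (List (String × String × Int × Int × Int)) × PySem.Set String) chunk =>
      (acc.1 ++ [all_tx_reads.filter
          (fun r => chunk.contains r.1 && !(PySem.Set.contains acc.2 r.1))],
       PySem.Set.update acc.2 chunk))
    ([], PySem.Set.empty)).1

-- ===== PRECONDITION & SPEC =====
def Spec_get_chunkify_readsList (child_gene_list : List (List String)) (all_tx_reads : List (String × String × Int × Int × Int)) (out : List (List (String × String × Int × Int × Int))) : Prop := out = get_chunkify_readsList_alt child_gene_list all_tx_reads
instance (child_gene_list : List (List String)) (all_tx_reads : List (String × String × Int × Int × Int)) (out : List (List (String × String × Int × Int × Int))) : Decidable (Spec_get_chunkify_readsList child_gene_list all_tx_reads out) := by unfold Spec_get_chunkify_readsList; infer_instance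

-- ===== CLAIM (what is proved, stated in full; the proofs are below) =====
def Claim_equal_get_chunkify_readsList : Prop := ∀ (child_gene_list : List (List String)) (all_tx_reads : List (String × String × Int × Int × Int)), Dom_get_chunkify_readsList child_gene_list all_tx_reads → Spec_get_chunkify_readsList child_gene_list all_tx_reads (get_chunkify_readsList child_gene_list all_tx_reads)

-- ===== LEMMAS AND PROOFS =====

-- common characterisation: bucket for the head chunk = matching reads, rest bucketed among the tail
def chunksSpec (chunks : List (List String)) (reads : List (String × String × Int × Int × Int)) :
    List (List (String × String × Int × Int × Int)) :=
  match chunks with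
  | [] => []
  | c :: cs =>
      (reads.filter fun r => c.contains r.1) ::
      chunksSpec cs (reads.filter fun r => !c.contains r.1)

theorem foldl_pvPlace_nil (reads : List (String × String × Int × Int × Int)) :
    reads.foldl (fun buckets read => pvPlace [] buckets read) ([] : List (List (String × String × Int × Int × Int))) = [] := by
  induction reads with
  | nil => rfl
  | cons r rs ih => simp only [List.foldl_cons, pvPlace]; exact ih

theorem foldl_pvPlace_cons (c : List String) (cs : List (List String))
    (reads : List (String × String × Int × Int × Int))
    (b : List (String × String × Int × Int × Int))
    (bs : List (List (String × String × Int × Int × Int))) :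
    reads.foldl (fun buckets read => pvPlace (c :: cs) buckets read) (b :: bs)
      = (b ++ reads.filter (fun r => c.contains r.1)) ::
        (reads.filter (fun r => !c.contains r.1)).foldl
          (fun buckets read => pvPlace cs buckets read) bs := by
  induction reads generalizing b bs with
  | nil => simp
  | cons r rs ih =>
      by_cases h : r.1 ∈ c <;>
        simp [List.foldl_cons, pvPlace, h, ih, List.append_assoc]

theorem portA_eq_chunksSpec (chunks : List (List String))
    (reads : List (String × String × Int × Int × Int)) :
    get_chunkify_readsList chunks reads = chunksSpec chunks reads := by
  induction chunks generalizing reads with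
  | nil => simp [get_chunkify_readsList, chunksSpec, foldl_pvPlace_nil reads]
  | cons c cs ih =>
      simp only [get_chunkify_readsList, List.map] at ih ⊢
      rw [foldl_pvPlace_cons, ih, chunksSpec]
      simp

theorem contains_update (s : PySem.Set String) (l : List String) (x : String) :
    (PySem.Set.update s l).contains x = (s.contains x || l.contains x) := by
  induction l generalizing s with
  | nil => simp [PySem.Set.update]
  | cons a as ih =>
      simp only [PySem.Set.update, List.foldl_cons] at ih ⊢
      rw [ih]
      by_cases h : a = x
      · simp [h, PySem.Set.mem_add]
      · simp [PySem.Set.mem_add, Ne.symm h]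

theorem portB_go (cs : List (List String))
    (reads : List (String × String × Int × Int × Int))
    (out : List (List (String × String × Int × Int × Int))) (s : PySem.Set String) :
    (cs.foldl
      (fun (acc : List (List (String × String × Int × Int × Int)) × PySem.Set String) chunk =>
        (acc.1 ++ [reads.filter (fun r => chunk.contains r.1 && !(PySem.Set.contains acc.2 r.1))],
         PySem.Set.update acc.2 chunk))
      (out, s)).1
    = out ++ chunksSpec cs (reads.filter fun r => !(s.contains r.1)) := by
  induction cs generalizing out s reads with
  | nil => simp [chunksSpec]
  | cons c cs ih =>
      rw [List.foldl_cons, ih, chunksSpec]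
      have h1 : (reads.filter (fun r => !(s.contains r.1))).filter (fun r => c.contains r.1)
          = reads.filter (fun r => c.contains r.1 && !(PySem.Set.contains s r.1)) := by
        rw [List.filter_filter]
      have h2 : (reads.filter (fun r => !(s.contains r.1))).filter (fun r => !c.contains r.1)
          = reads.filter (fun r => !((PySem.Set.update s c).contains r.1)) := by
        rw [List.filter_filter]
        apply List.filter_congr
        intro r _
        rw [contains_update]
        cases s.contains r.1 <;> cases (c.contains r.1 : Bool) <;> rfl
      rw [h1, h2]
      simp

theorem portB_eq_chunksSpec (chunks : List (List String))
    (reads : List (String × String × Int × Int × Int)) :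
    get_chunkify_readsList_alt chunks reads = chunksSpec chunks reads := by
  rw [get_chunkify_readsList_alt, portB_go]
  simp [PySem.Set.empty]

-- ===== VERDICT (by name: the statement is the Claim_ definition above) =====
theorem get_chunkify_readsList_spec : Claim_equal_get_chunkify_readsList := by
  intro cgl reads _
  unfold Spec_get_chunkify_readsList
  rw [portA_eq_chunksSpec, portB_eq_chunksSpec]
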